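-- pv_equiv track=rewrite | github.com/shsanantonio/mail-render | venv/lib/python3.9/site-packages/python_core/aesthetix.py | shift_left_ascii
-- ===== SOURCE A (Python) =====
-- def shift_left_ascii(ascii_text, size):
--     """ left shift the big text with specified
--         before:
--         BIG_TEXT
--         after:
--         --------->(size) BIG_TEXT
--     """
--     if type(size) != int:
--         raise TypeError
--
--     if type(ascii_text) != str:
--         raise TypeError
--
--     if not "\n" in ascii_text:
--         raise ValueError
--
--     lines = ascii_text.split("\n")
--     lines = [" " * size + line for line in lines]
--     lines = "\n".join(lines)
--     return lines
-- ===== SOURCE B (Python) =====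
-- def shift_left_ascii(ascii_text, size):
--     if type(size) != int:
--         raise TypeError
--
--     if type(ascii_text) != str:
--         raise TypeError
--
--     if not "\n" in ascii_text:
--         raise ValueError
--
--     pad = " " * size
--     out = []
--     at_line_start = True
--     for ch in ascii_text:
--         if at_line_start:
--             out.append(pad)
--         out.append(ch)
--         at_line_start = ch == "\n"
--     if at_line_start:
--         out.append(pad)
--     return "".join(out)
-- ===== Notes on version B (the rewrite author's own statement) =====
-- stated objective: alternative
-- what changed: Replaces A's staged split-into-lines / per-line comprehension / join pipeline with a single streaming pass over the characters that keeps an at-line-start flag and emits the padding whenever a line begins; no line list is ever built.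
import Mathlib
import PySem

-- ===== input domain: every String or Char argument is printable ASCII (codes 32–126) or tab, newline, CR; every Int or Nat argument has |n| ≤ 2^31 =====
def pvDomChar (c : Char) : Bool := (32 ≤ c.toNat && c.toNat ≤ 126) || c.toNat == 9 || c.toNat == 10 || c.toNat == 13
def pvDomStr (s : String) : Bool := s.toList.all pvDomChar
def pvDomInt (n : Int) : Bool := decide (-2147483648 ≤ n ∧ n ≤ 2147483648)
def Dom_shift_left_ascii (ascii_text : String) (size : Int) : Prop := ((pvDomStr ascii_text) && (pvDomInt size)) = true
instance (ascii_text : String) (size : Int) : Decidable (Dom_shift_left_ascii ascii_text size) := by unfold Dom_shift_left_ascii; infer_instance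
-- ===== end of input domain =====

-- B replaces A's split / per-line list comprehension / join pipeline with a single
-- streaming pass over the characters, emitting the padding at each line start (alternative).


-- ===== PORT A =====
-- The type guards always pass under the type convention; the 'if "\n" not in ascii_text:
-- raise ValueError' guard is exactly what Pre_ excludes.
def shift_left_ascii (ascii_text : String) (size : Int) : String :=
  let lines := PySem.Chars.splitOn ascii_text.toList ['\n']
  let lines := lines.map (fun line => PySem.List.pyRepeat [' '] size ++ line)
  String.mk (PySem.Chars.join ['\n'] lines)

-- ===== PORT B =====
-- loop body of Source B's for-loop: state is (out, at_line_start)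
def pvStepB (pad : List Char) (st : List (List Char) × Bool) (ch : Char) :
    List (List Char) × Bool :=
  let out := if st.2 then st.1 ++ [pad] else st.1
  (out ++ [[ch]], ch == '\n')

def shift_left_ascii_alt (ascii_text : String) (size : Int) : String :=
  let pad := PySem.List.pyRepeat [' '] size
  let st := ascii_text.toList.foldl (pvStepB pad) ([], true)
  let out := if st.2 then st.1 ++ [pad] else st.1
  String.mk (PySem.Chars.join [] out)

-- ===== PRECONDITION & SPEC =====
-- Pre_ excludes exactly the inputs on which Python A raises ValueError: text with no newline.
def Pre_shift_left_ascii (ascii_text : String) (size : Int) : Prop :=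
  PySem.Str.isIn "\n" ascii_text = true
instance (ascii_text : String) (size : Int) : Decidable (Pre_shift_left_ascii ascii_text size) := by unfold Pre_shift_left_ascii; infer_instance
def pvWitness_shift_left_ascii : String × Int := ("ab\ncd", 2)

def Spec_shift_left_ascii (ascii_text : String) (size : Int) (out : String) : Prop := out = shift_left_ascii_alt ascii_text size
instance (ascii_text : String) (size : Int) (out : String) : Decidable (Spec_shift_left_ascii ascii_text size out) := by unfold Spec_shift_left_ascii; infer_instance

-- ===== CLAIM (what is proved, stated in full; the proofs are below) =====
def Claim_equal_shift_left_ascii : Prop := ∀ (ascii_text : String) (size : Int), Dom_shift_left_ascii ascii_text size → Pre_shift_left_ascii ascii_text size → Spec_shift_left_ascii ascii_text size (shift_left_ascii ascii_text size)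

-- ===== LEMMAS AND PROOFS =====

-- Structural splitting on '\n' (proof-only characterisation).
def splitNl : List Char → List (List Char)
  | [] => [[]]
  | c :: t =>
    if c = '\n' then [] :: splitNl t
    else
      match splitNl t with
      | [] => [[c]]
      | p :: ps => (c :: p) :: ps

-- Structural joining with a separator (proof-only).
def joinW (sep : List Char) : List (List Char) → List Char
  | [] => []
  | [p] => p
  | p :: ps => p ++ sep ++ joinW sep ps

-- proof-only characterisation of B's streaming loop
def streamB (pad : List Char) : List Char → Bool → List Char
  | [], b => if b then pad else []
  | c :: t, b => (if b then pad else []) ++ c :: streamB pad t (c == '\n')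

theorem splitNl_ne_nil (l : List Char) : splitNl l ≠ [] := by
  cases l with
  | nil => simp [splitNl]
  | cons c t =>
    simp only [splitNl]
    split_ifs
    · simp
    · cases h : splitNl t <;> simp

def prep1 (x : List Char) : List (List Char) → List (List Char)
  | [] => [x]
  | p :: ps => (x ++ p) :: ps

theorem splitOn_go_eq (l : List Char) : ∀ (fuel : Nat) (cur : List Char) (acc : List (List Char)),
    l.length ≤ fuel →
    PySem.Chars.splitOn.go ['\n'] fuel l cur acc = acc.reverse ++ prep1 cur.reverse (splitNl l) := by
  induction l with
  | nil =>
    intro fuel cur acc _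
    cases fuel <;> simp [PySem.Chars.splitOn.go, splitNl, prep1]
  | cons c t ih =>
    intro fuel cur acc h
    cases fuel with
    | zero => simp at h
    | succ f =>
      simp only [List.length_cons, Nat.succ_le_succ_iff] at h
      by_cases hc : c = '\n'
      · subst hc
        have hpre : List.isPrefixOf ['\n'] ('\n' :: t) = true := by
          simp [List.isPrefixOf]
        simp only [PySem.Chars.splitOn.go, hpre, if_true, List.length_cons]
        simp only [List.length_nil, Nat.zero_add, List.drop_succ_cons, List.drop_zero]
        rw [ih f [] (cur.reverse :: acc) h]
        cases hs : splitNl t with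
        | nil => exact absurd hs (splitNl_ne_nil t)
        | cons p ps => simp [splitNl, prep1, hs]
      · have hpre : List.isPrefixOf ['\n'] (c :: t) = false := by
          simp [List.isPrefixOf]
          exact fun h' => absurd h'.symm hc
        simp only [PySem.Chars.splitOn.go, hpre]
        rw [if_neg (by simp), ih f (c :: cur) acc h]
        cases hs : splitNl t with
        | nil => exact absurd hs (splitNl_ne_nil t)
        | cons p ps => simp [splitNl, hc, prep1, hs]

theorem splitOn_nl (s : List Char) : PySem.Chars.splitOn s ['\n'] = splitNl s := by
  rw [PySem.Chars.splitOn, splitOn_go_eq s (s.length + 1) [] [] (by omega)]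
  cases hs : splitNl s with
  | nil => exact absurd hs (splitNl_ne_nil s)
  | cons p ps => simp [prep1]

theorem joinW_cons_cons (sep p q : List Char) (ps : List (List Char)) :
    joinW sep (p :: q :: ps) = p ++ sep ++ joinW sep (q :: ps) := rfl

theorem join_eq_joinW (sep : List Char) (ps : List (List Char)) :
    PySem.Chars.join sep ps = joinW sep ps := by
  induction ps with
  | nil => simp [PySem.Chars.join, List.intercalate, joinW]
  | cons p t ih =>
    cases t with
    | nil => simp [PySem.Chars.join, List.intercalate, joinW]
    | cons q r =>
      rw [joinW_cons_cons, ← ih]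
      simp [PySem.Chars.join, List.intercalate, List.intersperse]

theorem joinW_nil_flatten (ps : List (List Char)) : joinW [] ps = ps.flatten := by
  induction ps with
  | nil => simp [joinW]
  | cons p t ih =>
    cases t with
    | nil => simp [joinW]
    | cons q r => rw [joinW_cons_cons, ih]; simp

theorem shift_joinW (pre : List Char) (ps : List (List Char)) (h : ps ≠ []) :
    joinW ['\n'] (ps.map (fun p => pre ++ p)) = pre ++ joinW ('\n' :: pre) ps := by
  induction ps with
  | nil => exact absurd rfl h
  | cons p t ih =>
    cases t with
    | nil => simp [joinW]
    | cons q r =>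
      rw [List.map_cons, List.map_cons, joinW_cons_cons, joinW_cons_cons, ← List.map_cons, ih (by simp)]
      simp

-- the fold in B, flattened, computes streamB
theorem foldlB_eq_streamB (pad : List Char) (l : List Char) :
    ∀ (acc : List (List Char)) (b : Bool),
    (if (l.foldl (pvStepB pad) (acc, b)).2
       then (l.foldl (pvStepB pad) (acc, b)).1 ++ [pad]
       else (l.foldl (pvStepB pad) (acc, b)).1).flatten
      = acc.flatten ++ streamB pad l b := by
  induction l with
  | nil =>
    intro acc b
    cases b <;> simp [streamB]
  | cons c t ih =>
    intro acc b
    simp only [List.foldl_cons]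
    rw [show pvStepB pad (acc, b) c =
        ((if b then acc ++ [pad] else acc) ++ [[c]], c == '\n') from rfl]
    rw [ih]
    cases b <;> simp [streamB]

theorem streamB_true (pad : List Char) (l : List Char) :
    streamB pad l true = pad ++ streamB pad l false := by
  cases l <;> simp [streamB]

theorem streamB_false (pad : List Char) (l : List Char) :
    streamB pad l false = joinW ('\n' :: pad) (splitNl l) := by
  induction l with
  | nil => simp [streamB, splitNl, joinW]
  | cons c t ih =>
    by_cases hc : c = '\n'
    · subst hc
      simp only [streamB, beq_self_eq_true, streamB_true, ih, splitNl, if_pos rfl]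
      cases hs : splitNl t with
      | nil => exact absurd hs (splitNl_ne_nil t)
      | cons p ps => simp [joinW_cons_cons, hs]
    · have hb : (c == '\n') = false := by simp [hc]
      simp only [streamB, hb, ih, splitNl, if_neg hc]
      cases hs : splitNl t with
      | nil => exact absurd hs (splitNl_ne_nil t)
      | cons p ps =>
        cases ps with
        | nil => simp [joinW, hs]
        | cons q r => simp [joinW_cons_cons, hs]

-- ===== VERDICT (by name: the statement is the Claim_ definition above) =====
theorem shift_left_ascii_spec : Claim_equal_shift_left_ascii := by
  intro s n _ _
  show shift_left_ascii s n = shift_left_ascii_alt s n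
  simp only [shift_left_ascii, shift_left_ascii_alt, splitOn_nl, join_eq_joinW,
    shift_joinW _ _ (splitNl_ne_nil s.toList), joinW_nil_flatten,
    foldlB_eq_streamB, streamB_true, streamB_false, List.flatten_nil, List.nil_append]
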